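-- pv_equiv track=rewrite | github.com/paulacodes/AdventOfCode2021 | day3.py | find_numbers_with_predominant_bit
-- ===== SOURCE A (Python) =====
-- def find_numbers_with_predominant_bit(position, numbers, type):
-- 	zero_count = 0
-- 	one_count = 0
-- 	for number in numbers:
-- 		if number[position] == "0":
-- 			zero_count += 1
-- 		else:
-- 			one_count += 1
-- 	if type == "oxygen":
-- 		if zero_count > one_count:
-- 			predominant_number = "0"
-- 		else:
-- 			predominant_number = "1"
-- 	else:
-- 		if zero_count > one_count:
-- 			predominant_number = "1"
-- 		else:
-- 			predominant_number = "0"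
-- 	remaining_numbers = []
-- 	for number in numbers:
-- 		if number[position] == predominant_number:
-- 			remaining_numbers.append(number)
-- 	return remaining_numbers
-- ===== SOURCE B (Python) =====
-- def find_numbers_with_predominant_bit(position, numbers, type):
--     zeros = []
--     ones = []
--     for number in numbers:
--         bit = number[position]
--         if bit == "0":
--             zeros.append(number)
--         elif bit == "1":
--             ones.append(number)
--     zero_wins = len(zeros) > len(numbers) - len(zeros)
--     if type == "oxygen":
--         return zeros if zero_wins else ones
--     else:
--         return ones if zero_wins else zeros
-- ===== Notes on version B (the rewrite author's own statement) =====
-- stated objective: alternative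
-- what changed: Replaces A's count-then-rescan (one pass counting zero/one, then a second filtering pass) by a single partition pass into zeros/ones buckets, selecting the returned bucket from the bucket lengths.
import Mathlib
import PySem

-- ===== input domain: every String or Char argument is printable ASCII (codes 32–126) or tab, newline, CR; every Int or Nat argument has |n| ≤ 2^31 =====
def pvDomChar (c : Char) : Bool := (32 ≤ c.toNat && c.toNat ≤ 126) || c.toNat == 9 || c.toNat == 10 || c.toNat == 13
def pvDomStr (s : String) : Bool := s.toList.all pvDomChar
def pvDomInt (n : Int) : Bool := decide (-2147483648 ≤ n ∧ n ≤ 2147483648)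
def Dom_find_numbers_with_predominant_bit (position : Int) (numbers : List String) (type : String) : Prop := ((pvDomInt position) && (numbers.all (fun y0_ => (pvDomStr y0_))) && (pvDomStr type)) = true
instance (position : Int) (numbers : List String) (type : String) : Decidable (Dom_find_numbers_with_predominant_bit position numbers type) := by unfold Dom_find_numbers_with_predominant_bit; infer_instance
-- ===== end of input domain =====

-- B replaces A's count-then-rescan by a single partition pass into zeros/ones buckets,
-- selecting the returned bucket from the bucket lengths (objective: alternative decomposition).

-- ===== PORT A =====
-- count pass, then filter pass; number[position] is PySem.Str.pyGet? (none = IndexError,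
-- excluded by Pre_; .getD ' ' is only reached outside Pre_)
def find_numbers_with_predominant_bit (position : Int) (numbers : List String) (type : String) : List String :=
  let counts : Int × Int := numbers.foldl
    (fun c number =>
      if (PySem.Str.pyGet? number position).getD ' ' = '0' then (c.1 + 1, c.2) else (c.1, c.2 + 1))
    (0, 0)
  let predominant_number : Char :=
    if type = "oxygen" then
      (if counts.1 > counts.2 then '0' else '1')
    else
      (if counts.1 > counts.2 then '1' else '0')
  numbers.foldl
    (fun remaining_numbers number =>
      if (PySem.Str.pyGet? number position).getD ' ' = predominant_number then
        remaining_numbers ++ [number]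
      else remaining_numbers)
    []

-- ===== PORT B =====
def find_numbers_with_predominant_bit_alt (position : Int) (numbers : List String) (type : String) : List String :=
  let p : List String × List String := numbers.foldl
    (fun zo number =>
      let bit := (PySem.Str.pyGet? number position).getD ' '
      if bit = '0' then (zo.1 ++ [number], zo.2)
      else if bit = '1' then (zo.1, zo.2 ++ [number])
      else zo)
    ([], [])
  let zero_wins : Bool := p.1.length > numbers.length - p.1.length
  if type = "oxygen" then
    (if zero_wins then p.1 else p.2)
  else
    (if zero_wins then p.2 else p.1)

-- ===== PRECONDITION & SPEC =====
-- Pre_ excludes exactly the inputs where Python A raises IndexError (some number[position] out of range).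
def Pre_find_numbers_with_predominant_bit (position : Int) (numbers : List String) (type : String) : Prop :=
  ∀ s ∈ numbers, PySem.Raise.InRange s.toList.length position
instance (position : Int) (numbers : List String) (type : String) : Decidable (Pre_find_numbers_with_predominant_bit position numbers type) := by unfold Pre_find_numbers_with_predominant_bit; infer_instance

def pvWitness_find_numbers_with_predominant_bit : Int × List String × String := (1, ["010", "111", "001"], "oxygen")

def Spec_find_numbers_with_predominant_bit (position : Int) (numbers : List String) (type : String) (out : List String) : Prop := out = find_numbers_with_predominant_bit_alt position numbers type
instance (position : Int) (numbers : List String) (type : String) (out : List String) : Decidable (Spec_find_numbers_with_predominant_bit position numbers type out) := by unfold Spec_find_numbers_with_predominant_bit; infer_instance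

-- ===== CLAIM (what is proved, stated in full; the proofs are below) =====
def Claim_equal_find_numbers_with_predominant_bit : Prop := ∀ (position : Int) (numbers : List String) (type : String), Dom_find_numbers_with_predominant_bit position numbers type → Pre_find_numbers_with_predominant_bit position numbers type → Spec_find_numbers_with_predominant_bit position numbers type (find_numbers_with_predominant_bit position numbers type)

-- ===== LEMMAS AND PROOFS =====

-- the character A/B read at 'position' in string s
def pvBit (position : Int) (s : String) : Char := (PySem.Str.pyGet? s position).getD ' '

-- A's counting fold from an arbitrary start
lemma pv_count_fold (position : Int) (l : List String) (z o : Int) :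
    l.foldl (fun (c : Int × Int) number =>
        if pvBit position number = '0' then (c.1 + 1, c.2) else (c.1, c.2 + 1)) (z, o)
      = (z + (l.filter (fun s => pvBit position s = '0')).length,
         o + ((l.length : Int) - (l.filter (fun s => pvBit position s = '0')).length)) := by
  induction l generalizing z o with
  | nil => simp
  | cons x xs ih =>
    by_cases h : pvBit position x = '0' <;>
      simp [List.foldl_cons, h, ih] <;> ring

-- B's partition fold from an arbitrary start
lemma pv_part_fold (position : Int) (l : List String) (zs os : List String) :
    l.foldl (fun (zo : List String × List String) number =>
        let bit := pvBit position number
        if bit = '0' then (zo.1 ++ [number], zo.2)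
        else if bit = '1' then (zo.1, zo.2 ++ [number])
        else zo) (zs, os)
      = (zs ++ l.filter (fun s => pvBit position s = '0'),
         os ++ l.filter (fun s => pvBit position s = '1')) := by
  induction l generalizing zs os with
  | nil => simp
  | cons x xs ih =>
    by_cases h0 : pvBit position x = '0'
    · simp [List.foldl_cons, h0, ih]
    · by_cases h1 : pvBit position x = '1' <;>
        simp [List.foldl_cons, h0, h1, ih]

-- ===== VERDICT (by name: the statement is the Claim_ definition above) =====
theorem find_numbers_with_predominant_bit_spec : Claim_equal_find_numbers_with_predominant_bit := by
  intro position numbers type _ _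
  unfold Spec_find_numbers_with_predominant_bit
  unfold find_numbers_with_predominant_bit find_numbers_with_predominant_bit_alt
  simp only
  rw [show (fun (c : Int × Int) number =>
        if (PySem.Str.pyGet? number position).getD ' ' = '0' then (c.1 + 1, c.2) else (c.1, c.2 + 1))
      = (fun (c : Int × Int) number =>
        if pvBit position number = '0' then (c.1 + 1, c.2) else (c.1, c.2 + 1)) from rfl,
    pv_count_fold,
    show (fun (zo : List String × List String) number =>
        let bit := (PySem.Str.pyGet? number position).getD ' '
        if bit = '0' then (zo.1 ++ [number], zo.2)
        else if bit = '1' then (zo.1, zo.2 ++ [number])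
        else zo)
      = (fun (zo : List String × List String) number =>
        let bit := pvBit position number
        if bit = '0' then (zo.1 ++ [number], zo.2)
        else if bit = '1' then (zo.1, zo.2 ++ [number])
        else zo) from rfl,
    pv_part_fold]
  simp only [List.nil_append, PySem.List.foldl_append_ite_eq_filter]
  have hZle : (numbers.filter (fun s => pvBit position s = '0')).length ≤ numbers.length :=
    List.length_filter_le _ _
  have key : (((numbers.length : Int) - ((numbers.filter (fun s => pvBit position s = '0')).length : Int)
        < ((numbers.filter (fun s => pvBit position s = '0')).length : Int))
      ↔ (numbers.length - (numbers.filter (fun s => pvBit position s = '0')).length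
        < (numbers.filter (fun s => pvBit position s = '0')).length)) := by omega
  by_cases hc : numbers.length - (numbers.filter (fun s => pvBit position s = '0')).length
      < (numbers.filter (fun s => pvBit position s = '0')).length
  · have hcI := key.mpr hc
    by_cases ht : type = "oxygen" <;> simp only [pvBit, PySem.Str.pyGet?, PySem.Chars.pyGet?] at hc hcI ⊢ <;> simp [ht, hc, hcI] <;> rfl
  · have hcI : ¬ ((numbers.length : Int) - ((numbers.filter (fun s => pvBit position s = '0')).length : Int)
        < ((numbers.filter (fun s => pvBit position s = '0')).length : Int)) := fun h => hc (key.mp h)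
    by_cases ht : type = "oxygen" <;> simp only [pvBit, PySem.Str.pyGet?, PySem.Chars.pyGet?] at hc hcI ⊢ <;> simp [ht, hc, hcI] <;> rfl
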